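-- pv_equiv track=rewrite | github.com/paiml/depyler | examples/hard_prac_net_bandwidth.py | bw_variance_approx
-- ===== SOURCE A (Python) =====
-- def bw_moving_average(samples: list[int], window_size: int) -> int:
--     """Compute moving average of samples."""
--     total: int = 0
--     i: int = 0
--     while i < window_size:
--         s: int = samples[i]
--         total = total + s
--         i = i + 1
--     return total // window_size
--
-- def bw_variance_approx(samples: list[int], window_size: int) -> int:
--     """Approximate variance (mean of squared deviations from mean)."""
--     avg: int = bw_moving_average(samples, window_size)
--     total: int = 0
--     i: int = 0
--     while i < window_size:
--         s: int = samples[i]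
--         diff: int = s - avg
--         total = total + diff * diff
--         i = i + 1
--     return total // window_size
-- ===== SOURCE B (Python) =====
-- def bw_variance_approx(samples: list[int], window_size: int) -> int:
--     """Approximate variance (mean of squared deviations from mean)."""
--     sum_s: int = 0
--     sum_sq: int = 0
--     i: int = 0
--     while i < window_size:
--         s: int = samples[i]
--         sum_s = sum_s + s
--         sum_sq = sum_sq + s * s
--         i = i + 1
--     avg: int = sum_s // window_size
--     total: int = sum_sq - 2 * avg * sum_s + window_size * avg * avg
--     return total // window_size
-- ===== Notes on version B (the rewrite author's own statement) =====
-- stated objective: alternative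
-- what changed: Replaces A's two passes (a helper pass for the mean, then a squared-deviation pass) with one pass accumulating sum and sum of squares, then the exact integer expansion sum(s-avg)^2 = sum(s^2) - 2*avg*sum + n*avg^2 with the same floored avg.
import Mathlib
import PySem

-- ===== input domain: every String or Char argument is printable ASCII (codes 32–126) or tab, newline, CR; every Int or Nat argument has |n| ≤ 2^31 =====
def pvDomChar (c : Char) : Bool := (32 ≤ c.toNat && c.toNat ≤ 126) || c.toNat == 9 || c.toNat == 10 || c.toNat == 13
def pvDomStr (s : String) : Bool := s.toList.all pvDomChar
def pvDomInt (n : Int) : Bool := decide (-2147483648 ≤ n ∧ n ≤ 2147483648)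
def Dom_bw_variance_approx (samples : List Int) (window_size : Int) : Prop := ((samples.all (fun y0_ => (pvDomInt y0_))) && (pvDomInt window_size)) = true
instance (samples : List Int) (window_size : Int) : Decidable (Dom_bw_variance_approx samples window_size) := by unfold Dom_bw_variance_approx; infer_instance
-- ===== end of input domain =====

-- B replaces A's two passes (mean pass, then squared-deviation pass) by ONE pass accumulating
-- sum and sum of squares, then the exact integer expansion Σ(s-avg)² = Σs² - 2·avg·Σs + n·avg².

-- ===== PORT A =====
-- 'while i < window_size: total += samples[i]' ported as a fold over range(0, window_size)
def bw_moving_average (samples : List Int) (window_size : Int) : Int :=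
  let total := (PySem.List.pyRange 0 window_size 1).foldl
    (fun total i => total + PySem.List.pyGetD samples i 0) 0
  PySem.Int.floordiv total window_size

def bw_variance_approx (samples : List Int) (window_size : Int) : Int :=
  let avg := bw_moving_average samples window_size
  let total := (PySem.List.pyRange 0 window_size 1).foldl
    (fun total i =>
      let s := PySem.List.pyGetD samples i 0
      let diff := s - avg
      total + diff * diff) 0
  PySem.Int.floordiv total window_size

-- ===== PORT B =====
def bw_variance_approx_alt (samples : List Int) (window_size : Int) : Int :=
  let p := (PySem.List.pyRange 0 window_size 1).foldl
    (fun (p : Int × Int) i =>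
      let s := PySem.List.pyGetD samples i 0
      (p.1 + s, p.2 + s * s)) (0, 0)
  let avg := PySem.Int.floordiv p.1 window_size
  let total := p.2 - 2 * avg * p.1 + window_size * avg * avg
  PySem.Int.floordiv total window_size

-- ===== PRECONDITION & SPEC =====
-- Pre_ excludes exactly where A raises: window_size = 0 (ZeroDivisionError) and
-- window_size > len(samples) (IndexError). Negative window_size is fine (both loops skip).
def Pre_bw_variance_approx (samples : List Int) (window_size : Int) : Prop :=
  window_size ≠ 0 ∧ window_size ≤ (samples.length : Int)
instance (samples : List Int) (window_size : Int) : Decidable (Pre_bw_variance_approx samples window_size) := by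
  unfold Pre_bw_variance_approx; infer_instance

def pvWitness_bw_variance_approx : List Int × Int := ([3, 7, 5, 1], 3)

def Spec_bw_variance_approx (samples : List Int) (window_size : Int) (out : Int) : Prop := out = bw_variance_approx_alt samples window_size
instance (samples : List Int) (window_size : Int) (out : Int) : Decidable (Spec_bw_variance_approx samples window_size out) := by unfold Spec_bw_variance_approx; infer_instance

-- ===== CLAIM (what is proved, stated in full; the proofs are below) =====
def Claim_equal_bw_variance_approx : Prop := ∀ (samples : List Int) (window_size : Int), Dom_bw_variance_approx samples window_size → Pre_bw_variance_approx samples window_size → Spec_bw_variance_approx samples window_size (bw_variance_approx samples window_size)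

-- ===== LEMMAS AND PROOFS =====

-- Σ(s-a)² expanded: sum of squared deviations = Σs² - 2a·Σs + n·a²
theorem pv_dev_expand (w : List Int) (a : Int) :
    (w.map (fun s => (s - a) * (s - a))).sum
      = (w.map (fun s => s * s)).sum - 2 * a * (w.map (fun s => s)).sum + (w.length : Int) * a * a := by
  induction w with
  | nil => simp
  | cons x t ih =>
    simp only [List.map_cons, List.sum_cons, List.length_cons, ih]
    push_cast
    ring

-- a fold over range(0, ws) reading samples[i] is a fold over the window samples.take ws.toNat
theorem pv_fold_window (samples : List Int) (ws : Int) (h0 : 0 ≤ ws)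
    (hle : ws ≤ (samples.length : Int)) (f : Int → Int → Int) (init : Int) :
    (PySem.List.pyRange 0 ws 1).foldl (fun acc i => f acc (PySem.List.pyGetD samples i 0)) init
      = (samples.take ws.toNat).foldl f init := by
  have hlen : ((samples.take ws.toNat).length : Int) = ws := by
    simp [List.length_take]
    omega
  have hcongr : (PySem.List.pyRange 0 ws 1).foldl
      (fun acc i => f acc (PySem.List.pyGetD samples i 0)) init
      = (PySem.List.pyRange 0 ws 1).foldl
      (fun acc i => f acc (PySem.List.pyGetD (samples.take ws.toNat) i 0)) init := by
    apply PySem.List.foldl_congr_mem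
    intro acc i hi
    have hi' := (PySem.List.mem_pyRange_one).1 hi
    have h1 : PySem.List.pyGetD samples i 0 = PySem.List.pyGetD (samples.take ws.toNat) i 0 := by
      have hiN : i.toNat < (samples.take ws.toNat).length := by
        simp [List.length_take]; omega
      have hiS : i.toNat < samples.length := by omega
      rw [PySem.List.pyGetD_of_nonneg, PySem.List.pyGetD_of_nonneg]
      simp [hiS, List.getElem?_take, hi'.2, lt_of_le_of_lt hi'.1 hi'.2]
      all_goals exact hi'.1
    rw [h1]
  rw [hcongr]
  have h := PySem.List.foldl_pyRange_zero_pyGetD' (samples.take ws.toNat) 0 f init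
  rw [hlen] at h
  exact h

-- ===== VERDICT (by name: the statement is the Claim_ definition above) =====
theorem bw_variance_approx_spec : Claim_equal_bw_variance_approx := by
  intro samples ws _hdom hpre
  obtain ⟨hne, hle⟩ := hpre
  unfold Spec_bw_variance_approx bw_variance_approx bw_variance_approx_alt bw_moving_average
  simp only []
  rcases lt_or_gt_of_ne hne with hneg | hpos
  · -- window_size < 0: all loops are empty, both sides are 0 // ws = 0
    rw [PySem.List.pyRange_one_eq_nil (by omega)]
    simp [PySem.Int.floordiv, Int.zero_fdiv]
  · -- window_size > 0
    have h0 : (0:Int) ≤ ws := le_of_lt hpos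
    set w := samples.take ws.toNat with hw
    have hlen : ((w.length : Int)) = ws := by
      simp [hw, List.length_take]; omega
    -- B's paired fold splits into two folds (sum and sum of squares)
    rw [PySem.List.foldl_prod_mk
      (f := fun acc i => acc + PySem.List.pyGetD samples i 0)
      (g := fun acc i => acc + PySem.List.pyGetD samples i 0 * PySem.List.pyGetD samples i 0)]
    -- rewrite every index fold as a fold over the window w
    rw [pv_fold_window samples ws h0 hle (fun acc s => acc + s) 0,
        pv_fold_window samples ws h0 hle (fun acc s => acc + s * s) 0]
    set a := PySem.Int.floordiv (w.foldl (fun acc s => acc + s) 0) ws with ha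
    rw [pv_fold_window samples ws h0 hle (fun acc s => acc + (s - a) * (s - a)) 0]
    -- turn the folds into list sums and use the algebraic expansion
    rw [PySem.List.foldl_add (g := fun s => (s - a) * (s - a)),
        PySem.List.foldl_add (g := fun s => s), PySem.List.foldl_add (g := fun s => s * s)]
    simp only [zero_add]
    rw [pv_dev_expand w a, hlen]
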